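-- pv_equiv track=rewrite | github.com/CameronFRWatson/Deduper | watson_deduper.py | errCorrect_umi
-- ===== SOURCE A (Python) =====
-- def errCorrect_umi(x, udict):
--     '''
--     Calculates the Hamming Distance for a given incorrect UMI (x) against all UMIs in the specified UMI
--     dictionary (udict). If the Hamming Distance is equal to 1 for a single dictionary UMI, x is corrected
--     to that UMI. If multiple known UMIs have a Hamming Dist equal to 1, x is not corrected and is discarded.
--     Must specify --correctUMI for this function to be used.
--     '''
--     hd_list = []
--     for key in udict:
--         hamm_dist = 0
--         for i in range(0, len(key)):
--             if x[i] != key[i]: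
--                 hamm_dist += 1 # calculating the hamming distance between unknown umi and current dict umi
--         if hamm_dist == 1:
--             hd_list.append(key) # storing the known UMIs that were close to the unknown
--     if len(hd_list) == 1:
--         return hd_list[0] # if the unknown is only close to a single known, return the known
--     else:
--         return x
-- ===== SOURCE B (Python) =====
-- def errCorrect_umi(x, udict):
--     """Instead of scanning every known UMI and computing its Hamming distance to x
--     (O(N*L)), generate every string at Hamming distance exactly 1 from the relevant
--     prefix of x (over the alphabet of characters that occur in the known UMIs) and
--     test set membership, collecting the known UMIs at distance 1."""
--     keys = set(udict)
--     lengths = set()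
--     alphabet = set()
--     for k in keys:
--         lengths.add(len(k))
--         alphabet.update(k)
--     matches = []
--     for m in lengths:
--         prefix = x[:m]
--         for i in range(m):
--             for c in alphabet:
--                 if c != prefix[i]:
--                     cand = prefix[:i] + c + prefix[i + 1:]
--                     if cand in keys:
--                         matches.append(cand)
--     return matches[0] if len(matches) == 1 else x
-- ===== Notes on version B (the rewrite author's own statement) =====
-- stated objective: alternative
-- what changed: A scans every known UMI in the dictionary and computes its Hamming distance to x; B builds the key set once and instead generates every distance-1 neighbour of x's relevant prefixes (over the alphabet and lengths occurring in the keys) and tests each for set membership, so the per-key distance loop disappears.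
import Mathlib
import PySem

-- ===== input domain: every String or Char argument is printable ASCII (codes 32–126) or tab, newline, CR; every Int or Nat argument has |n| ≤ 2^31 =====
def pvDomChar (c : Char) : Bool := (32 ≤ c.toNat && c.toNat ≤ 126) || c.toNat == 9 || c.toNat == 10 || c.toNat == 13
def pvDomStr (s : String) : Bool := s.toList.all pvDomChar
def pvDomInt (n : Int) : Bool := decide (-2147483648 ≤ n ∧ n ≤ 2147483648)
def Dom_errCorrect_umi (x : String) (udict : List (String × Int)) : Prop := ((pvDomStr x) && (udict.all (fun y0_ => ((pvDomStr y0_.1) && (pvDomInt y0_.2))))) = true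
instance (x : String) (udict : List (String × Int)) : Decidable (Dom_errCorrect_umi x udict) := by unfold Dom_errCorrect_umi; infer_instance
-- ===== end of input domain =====

-- B replaces A's scan of all N known UMIs (Hamming distance each) by generating the
-- distance-1 neighbours of x (over the alphabet and lengths occurring in the keys)
-- and testing set membership.

-- ===== PORT A =====
-- 'for key in udict' iterates the dict's keys: first occurrences, in order = PySem.List.dedup.
def errCorrect_umi (x : String) (udict : List (String × Int)) : String :=
  let keys := PySem.List.dedup (udict.map Prod.fst)
  let hd_list := keys.foldl (fun hd_list key =>
    let hamm_dist : Int :=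
      (PySem.List.pyRange 0 (PySem.Str.len key)).foldl
        (fun h i =>
          if PySem.List.pyGet? x.toList i ≠ PySem.List.pyGet? key.toList i then h + 1 else h) 0
    if hamm_dist = 1 then hd_list ++ [key] else hd_list) []
  if hd_list.length = 1 then (PySem.List.pyGet? hd_list 0).getD x else x

-- ===== PORT B =====
-- slices prefix[:i] / prefix[i+1:] with 0 ≤ i < len(prefix) are List.take / List.drop
-- (exact there); prefix[i] with 0 ≤ i < len(prefix) is List.getD (exact there).
def errCorrect_umi_alt (x : String) (udict : List (String × Int)) : String :=
  let keys : PySem.Set String := PySem.Set.ofList (udict.map Prod.fst)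
  let lengths : PySem.Set Nat := keys.foldl (fun s k => s.add k.toList.length) PySem.Set.empty
  let alphabet : PySem.Set Char := keys.foldl (fun s k => s.update k.toList) PySem.Set.empty
  let xs := x.toList
  let cands : List String := lengths.foldl (fun acc m =>
    let pre := xs.take m
    (List.range m).foldl (fun acc i =>
        alphabet.foldl (fun acc c =>
          if c ≠ pre.getD i ' ' then
            let cand := String.ofList (pre.take i ++ [c] ++ pre.drop (i + 1))
            if keys.contains cand then acc ++ [cand] else acc
          else acc) acc) acc) []
  if cands.length = 1 then (PySem.List.pyGet? cands 0).getD x else x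

-- ===== PRECONDITION & SPEC =====
-- A indexes x[i] for every i < len(key): it raises IndexError exactly when some dict
-- key is longer than x, and those inputs (and only those) are excluded here.
def Pre_errCorrect_umi (x : String) (udict : List (String × Int)) : Prop :=
  ∀ p ∈ udict, p.1.toList.length ≤ x.toList.length
instance (x : String) (udict : List (String × Int)) : Decidable (Pre_errCorrect_umi x udict) := by
  unfold Pre_errCorrect_umi; infer_instance
def pvWitness_errCorrect_umi : String × (List (String × Int)) := ("AC", [("AA", 0)])

def Spec_errCorrect_umi (x : String) (udict : List (String × Int)) (out : String) : Prop := out = errCorrect_umi_alt x udict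
instance (x : String) (udict : List (String × Int)) (out : String) : Decidable (Spec_errCorrect_umi x udict out) := by unfold Spec_errCorrect_umi; infer_instance

-- ===== CLAIM (what is proved, stated in full; the proofs are below) =====
def Claim_equal_errCorrect_umi : Prop := ∀ (x : String) (udict : List (String × Int)), Dom_errCorrect_umi x udict → Pre_errCorrect_umi x udict → Spec_errCorrect_umi x udict (errCorrect_umi x udict)

-- ===== LEMMAS AND PROOFS =====

-- A's Hamming count of key k against x, as a countP over positions.
def pvHamm (xs ks : List Char) : Nat :=
  (List.range ks.length).countP (fun i => decide (xs[i]? ≠ ks[i]?))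

-- B's candidate at length m, position i, replacement character c.
def pvCand (xs : List Char) (m i : Nat) (c : Char) : String :=
  String.ofList ((xs.take m).take i ++ [c] ++ (xs.take m).drop (i + 1))

-- the per-length chunk of B's candidate list, in flatMap form
def pvG (xs : List Char) (K : PySem.Set String) (Alph : PySem.Set Char) (m : Nat) : List String :=
  (List.range m).flatMap (fun i =>
    Alph.flatMap (fun c =>
      if c ≠ (xs.take m).getD i ' ' ∧ K.contains (pvCand xs m i c) = true
      then [pvCand xs m i c] else []))

-- A's inner loop computes pvHamm.
theorem pvHammA (xs ks : List Char) :
    (PySem.List.pyRange 0 ((ks.length : Nat) : Int)).foldl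
      (fun h i => if PySem.List.pyGet? xs i ≠ PySem.List.pyGet? ks i then h + 1 else h) 0
    = (pvHamm xs ks : Int) := by
  rw [PySem.List.pyRange_zero_natCast, List.foldl_map]
  have h := PySem.List.foldl_count_if
      (fun i : Nat => decide (PySem.List.pyGet? xs (i : Int) ≠ PySem.List.pyGet? ks (i : Int)))
      (List.range ks.length) 0
  simp only [decide_eq_true_eq] at h
  rw [h]
  simp [pvHamm]

-- A's whole loop builds the filtered key list.
theorem pvAList (xs : List Char) (K : List String) :
    K.foldl (fun hd_list key =>
      if ((PySem.List.pyRange 0 (PySem.Str.len key)).foldl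
          (fun h i => if PySem.List.pyGet? xs i ≠ PySem.List.pyGet? key.toList i then h + 1 else h) 0) = (1 : Int)
      then hd_list ++ [key] else hd_list) []
    = K.filter (fun k => decide (pvHamm xs k.toList = 1)) := by
  simp only [PySem.Str.len_eq, pvHammA, Nat.cast_eq_one]
  simpa using PySem.List.foldl_append_if (fun k : String => decide (pvHamm xs k.toList = 1)) id K []

-- countP over a range equal to one: a unique position satisfies p.
theorem pvCountPOne (m : Nat) (p : Nat → Bool) :
    (List.range m).countP p = 1 ↔ ∃ i, i < m ∧ p i = true ∧ ∀ j, j < m → j ≠ i → ¬ p j = true := by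
  rw [List.countP_eq_length_filter, List.length_eq_one_iff]
  constructor
  · rintro ⟨i, hi⟩
    have him : i ∈ List.filter p (List.range m) := by rw [hi]; exact List.mem_singleton.2 rfl
    rw [List.mem_filter, List.mem_range] at him
    refine ⟨i, him.1, him.2, ?_⟩
    intro j hj hne hpj
    have hjm : j ∈ List.filter p (List.range m) := List.mem_filter.2 ⟨List.mem_range.2 hj, hpj⟩
    rw [hi, List.mem_singleton] at hjm
    exact hne hjm
  · rintro ⟨i, him, hpi, huniq⟩
    refine ⟨i, ?_⟩
    rw [← List.perm_singleton]
    rw [List.perm_ext_iff_of_nodup (List.Nodup.filter _ List.nodup_range) (List.nodup_singleton i)]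
    intro a
    simp only [List.mem_filter, List.mem_range, List.mem_singleton]
    constructor
    · rintro ⟨ham, hpa⟩
      by_contra hne
      exact huniq a ham hne hpa
    · rintro rfl
      exact ⟨him, hpi⟩

theorem pvCand_toList (xs : List Char) (m i : Nat) (c : Char) (hm : m ≤ xs.length) (hi : i < m) :
    (pvCand xs m i c).toList = (xs.take m).set i c := by
  have hlen : i < (xs.take m).length := by simp [List.length_take]; omega
  rw [pvCand, String.toList_ofList, List.set_eq_take_append_cons_drop, if_pos hlen]
  simp

theorem pvCand_length (xs : List Char) (m i : Nat) (c : Char) (hm : m ≤ xs.length) (hi : i < m) :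
    (pvCand xs m i c).toList.length = m := by
  rw [pvCand_toList xs m i c hm hi]
  simp [List.length_take]
  omega

theorem pvCand_get (xs : List Char) (m i : Nat) (c : Char) (hm : m ≤ xs.length) (hi : i < m)
    (j : Nat) (hj : j < m) :
    (pvCand xs m i c).toList[j]? = if j = i then some c else xs[j]? := by
  have hlen : i < (xs.take m).length := by simp [List.length_take]; omega
  rw [pvCand_toList xs m i c hm hi, List.getElem?_set]
  by_cases h : j = i
  · rw [if_pos h, if_pos h.symm, if_pos hlen]
  · rw [if_neg h, if_neg (fun hh => h hh.symm), List.getElem?_take, if_pos hj]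

-- xs[i] as the List.getD value B reads from the prefix
theorem pvGetD (xs : List Char) (m i : Nat) (hm : m ≤ xs.length) (hi : i < m) :
    xs[i]? = some ((xs.take m).getD i ' ') := by
  rw [List.getD_eq_getElem?_getD, List.getElem?_take, if_pos hi,
      List.getElem?_eq_getElem (lt_of_lt_of_le hi hm)]
  simp

-- reconstruction: a string at Hamming distance 1 from x is a pvCand
theorem pvRecon (xs : List Char) (s : String) (i : Nat) (hm : s.toList.length ≤ xs.length)
    (hi : i < s.toList.length)
    (hne : xs[i]? ≠ s.toList[i]?)
    (hagree : ∀ j, j < s.toList.length → j ≠ i → xs[j]? = s.toList[j]?) :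
    s = pvCand xs s.toList.length i (s.toList.getD i ' ') := by
  have h1 : (pvCand xs s.toList.length i (s.toList.getD i ' ')).toList = s.toList := by
    apply List.ext_getElem?
    intro j
    by_cases hj : j < s.toList.length
    · rw [pvCand_get xs _ i _ hm hi j hj]
      by_cases hji : j = i
      · subst hji
        rw [if_pos rfl, List.getD_eq_getElem?_getD, List.getElem?_eq_getElem hj]
        simp
      · rw [if_neg hji, hagree j hj hji]
    · have hlc := pvCand_length xs s.toList.length i (s.toList.getD i ' ') hm hi
      have e1 : (pvCand xs s.toList.length i (s.toList.getD i ' ')).toList[j]? = none :=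
        List.getElem?_eq_none_iff.2 (by rw [hlc]; omega)
      have e2 : s.toList[j]? = none := List.getElem?_eq_none_iff.2 (by omega)
      rw [e1, e2]
  have h2 := congrArg String.ofList h1
  rw [String.ofList_toList, String.ofList_toList] at h2
  exact h2.symm

-- pvHamm = 1 means: a unique mismatching position
theorem pvHamm_one_iff (xs s : List Char) :
    pvHamm xs s = 1 ↔ ∃ i, i < s.length ∧ xs[i]? ≠ s[i]? ∧
      ∀ j, j < s.length → j ≠ i → xs[j]? = s[j]? := by
  rw [pvHamm, pvCountPOne]
  constructor
  · rintro ⟨i, hi, h1, h2⟩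
    refine ⟨i, hi, by simpa using h1, ?_⟩
    intro j hj hne
    have := h2 j hj hne
    simpa using this
  · rintro ⟨i, hi, h1, h2⟩
    refine ⟨i, hi, by simpa using h1, ?_⟩
    intro j hj hne
    simpa using h2 j hj hne

-- membership in the alphabet fold
theorem pvMemAlph (K : List String) (s0 : PySem.Set Char) (c : Char) :
    c ∈ K.foldl (fun s k => PySem.Set.update s k.toList) s0 ↔ c ∈ s0 ∨ ∃ k ∈ K, c ∈ k.toList := by
  induction K generalizing s0 with
  | nil => simp
  | cons a K ih =>
    rw [List.foldl_cons, ih, PySem.Set.mem_update]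
    constructor
    · rintro (⟨h | h⟩ | ⟨k, hk, hc⟩)
      · exact Or.inl h
      · exact Or.inr ⟨a, List.mem_cons_self, h⟩
      · exact Or.inr ⟨k, List.mem_cons_of_mem a hk, hc⟩
    · rintro (h | ⟨k, hk, hc⟩)
      · exact Or.inl (Or.inl h)
      · rcases List.mem_cons.1 hk with rfl | hk'
        · exact Or.inl (Or.inr hc)
        · exact Or.inr ⟨k, hk', hc⟩

theorem pvNodupAlph (K : List String) (s0 : PySem.Set Char) (h : s0.Nodup) :
    (K.foldl (fun s k => PySem.Set.update s k.toList) s0).Nodup := by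
  induction K generalizing s0 with
  | nil => exact h
  | cons a K ih => exact ih _ (PySem.Set.nodup_update _ _ h)

-- B's loop nest in flatMap form
theorem pvBList (xs : List Char) (K : PySem.Set String) (L : PySem.Set Nat) (Alph : PySem.Set Char) :
    (L.foldl (fun acc m =>
        (List.range m).foldl (fun acc i =>
          Alph.foldl (fun acc c =>
            if c ≠ (xs.take m).getD i ' ' then
              if K.contains (String.ofList ((xs.take m).take i ++ [c] ++ (xs.take m).drop (i + 1)))
              then acc ++ [String.ofList ((xs.take m).take i ++ [c] ++ (xs.take m).drop (i + 1))]
              else acc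
            else acc) acc) acc) [])
    = L.flatMap (pvG xs K Alph) := by
  have h1 : ∀ (m i : Nat) (acc : List String),
      Alph.foldl (fun acc c =>
        if c ≠ (xs.take m).getD i ' ' then
          if K.contains (String.ofList ((xs.take m).take i ++ [c] ++ (xs.take m).drop (i + 1)))
          then acc ++ [String.ofList ((xs.take m).take i ++ [c] ++ (xs.take m).drop (i + 1))]
          else acc
        else acc) acc
      = acc ++ Alph.flatMap (fun c =>
          if c ≠ (xs.take m).getD i ' ' ∧ K.contains (pvCand xs m i c) = true
          then [pvCand xs m i c] else []) := by
    intro m i acc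
    rw [show (fun (acc : List String) c =>
        if c ≠ (xs.take m).getD i ' ' then
          if K.contains (String.ofList ((xs.take m).take i ++ [c] ++ (xs.take m).drop (i + 1)))
          then acc ++ [String.ofList ((xs.take m).take i ++ [c] ++ (xs.take m).drop (i + 1))]
          else acc
        else acc)
      = (fun (acc : List String) c => acc ++
          (if c ≠ (xs.take m).getD i ' ' ∧ K.contains (pvCand xs m i c) = true
           then [pvCand xs m i c] else [])) from ?_]
    · exact PySem.List.foldl_append_eq_flatMap _ _ _
    · funext acc c
      by_cases hP : c = (xs.take m).getD i ' '
      · rw [if_neg (not_not_intro hP), if_neg (fun h => h.1 hP), List.append_nil]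
      · rw [if_pos hP]
        by_cases hQ : K.contains (String.ofList ((xs.take m).take i ++ [c] ++ (xs.take m).drop (i + 1))) = true
        · rw [if_pos hQ,
              if_pos (show c ≠ (xs.take m).getD i ' ' ∧ K.contains (pvCand xs m i c) = true from
                ⟨hP, hQ⟩)]
          simp only [pvCand]
        · rw [if_neg hQ,
              if_neg (show ¬(c ≠ (xs.take m).getD i ' ' ∧ K.contains (pvCand xs m i c) = true) from
                fun h => hQ h.2),
              List.append_nil]
  have h2 : ∀ (m : Nat) (acc : List String),
      (List.range m).foldl (fun acc i =>
        acc ++ Alph.flatMap (fun c =>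
          if c ≠ (xs.take m).getD i ' ' ∧ K.contains (pvCand xs m i c) = true
          then [pvCand xs m i c] else [])) acc
      = acc ++ (List.range m).flatMap (fun i =>
          Alph.flatMap (fun c =>
            if c ≠ (xs.take m).getD i ' ' ∧ K.contains (pvCand xs m i c) = true
            then [pvCand xs m i c] else [])) := by
    intro m acc
    exact PySem.List.foldl_append_eq_flatMap _ _ _
  simp only [h1, h2]
  rw [show (fun (acc : List String) (m : Nat) => acc ++
        (List.range m).flatMap (fun i =>
          Alph.flatMap (fun c =>
            if c ≠ (xs.take m).getD i ' ' ∧ K.contains (pvCand xs m i c) = true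
            then [pvCand xs m i c] else [])))
      = (fun (acc : List String) (m : Nat) => acc ++ pvG xs K Alph m) from by
        funext acc m
        rw [pvG]]
  rw [PySem.List.foldl_append_eq_flatMap, List.nil_append]

-- membership in pvG
theorem pvMemG (xs : List Char) (K : PySem.Set String) (Alph : PySem.Set Char) (m : Nat) (s : String) :
    s ∈ pvG xs K Alph m ↔ ∃ i, i < m ∧ ∃ c, c ∈ Alph ∧
      c ≠ (xs.take m).getD i ' ' ∧ K.contains (pvCand xs m i c) = true ∧ s = pvCand xs m i c := by
  constructor
  · intro hs
    rw [pvG] at hs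
    simp only [List.mem_flatMap, List.mem_range] at hs
    obtain ⟨i, hi, c, hc, hin⟩ := hs
    refine ⟨i, hi, c, hc, ?_⟩
    by_cases hcond : c ≠ (xs.take m).getD i ' ' ∧ K.contains (pvCand xs m i c) = true
    · rw [if_pos hcond] at hin
      simp at hin
      exact ⟨hcond.1, hcond.2, hin⟩
    · rw [if_neg hcond] at hin
      simp at hin
  · rintro ⟨i, hi, c, hc, hcond1, hcond2, rfl⟩
    rw [pvG]
    simp only [List.mem_flatMap, List.mem_range]
    refine ⟨i, hi, c, hc, ?_⟩
    rw [if_pos ⟨hcond1, hcond2⟩]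
    simp

-- every element of pvG has length m
theorem pvG_len (xs : List Char) (K : PySem.Set String) (Alph : PySem.Set Char) (m : Nat)
    (hm : m ≤ xs.length) (s : String) (hs : s ∈ pvG xs K Alph m) : s.toList.length = m := by
  obtain ⟨i, hi, c, _, _, _, rfl⟩ := (pvMemG xs K Alph m s).1 hs
  exact pvCand_length xs m i c hm hi

-- pvG produces no duplicates
theorem pvNodupG (xs : List Char) (K : PySem.Set String) (Alph : PySem.Set Char) (m : Nat)
    (hm : m ≤ xs.length) (hA : Alph.Nodup) : (pvG xs K Alph m).Nodup := by
  rw [pvG]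
  · rw [List.nodup_flatMap]
    constructor
    · intro i hi
      rw [List.mem_range] at hi
      rw [List.nodup_flatMap]
      constructor
      · intro c hc
        by_cases hcond : c ≠ (xs.take m).getD i ' ' ∧ K.contains (pvCand xs m i c) = true
        · rw [if_pos hcond]; exact List.nodup_singleton _
        · rw [if_neg hcond]; exact List.nodup_nil
      · refine List.Pairwise.imp ?_ hA
        intro c c' hcc' s hsc hsc'
        have hsc : s ∈ (if c ≠ (xs.take m).getD i ' ' ∧ K.contains (pvCand xs m i c) = true
            then [pvCand xs m i c] else []) := hsc
        have hsc' : s ∈ (if c' ≠ (xs.take m).getD i ' ' ∧ K.contains (pvCand xs m i c') = true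
            then [pvCand xs m i c'] else []) := hsc'
        have e1 : s = pvCand xs m i c := by
          by_cases hcond : c ≠ (xs.take m).getD i ' ' ∧ K.contains (pvCand xs m i c) = true
          · rw [if_pos hcond] at hsc; simpa using hsc
          · rw [if_neg hcond] at hsc; simp at hsc
        have e2 : s = pvCand xs m i c' := by
          by_cases hcond : c' ≠ (xs.take m).getD i ' ' ∧ K.contains (pvCand xs m i c') = true
          · rw [if_pos hcond] at hsc'; simpa using hsc'
          · rw [if_neg hcond] at hsc'; simp at hsc'
        have g1 := pvCand_get xs m i c hm hi i hi
        have g2 := pvCand_get xs m i c' hm hi i hi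
        rw [if_pos rfl] at g1 g2
        rw [← e1] at g1
        rw [← e2] at g2
        rw [g1] at g2
        exact hcc' (Option.some.inj g2)
    · refine List.Pairwise.imp_of_mem ?_ List.nodup_range
      intro i i' hiR hiR' hii' s hsi hsi'
      rw [List.mem_range] at hiR hiR'
      have hmem : ∀ (i₀ : Nat), i₀ < m →
          s ∈ Alph.flatMap (fun c =>
            if c ≠ (xs.take m).getD i₀ ' ' ∧ K.contains (pvCand xs m i₀ c) = true
            then [pvCand xs m i₀ c] else []) →
          xs[i₀]? ≠ s.toList[i₀]? ∧ ∀ j, j < m → j ≠ i₀ → xs[j]? = s.toList[j]? := by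
        intro i₀ hi₀ hsin
        simp only [List.mem_flatMap] at hsin
        obtain ⟨c, hc, hin⟩ := hsin
        by_cases hcond : c ≠ (xs.take m).getD i₀ ' ' ∧ K.contains (pvCand xs m i₀ c) = true
        · rw [if_pos hcond] at hin
          simp at hin
          subst hin
          constructor
          · rw [pvCand_get xs m i₀ c hm hi₀ i₀ hi₀, if_pos rfl, pvGetD xs m i₀ hm hi₀]
            intro hcontra
            exact hcond.1 (Option.some.inj hcontra).symm
          · intro j hj hji
            rw [pvCand_get xs m i₀ c hm hi₀ j hj, if_neg hji]
        · rw [if_neg hcond] at hin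
          simp at hin
      have h1 := hmem i hiR hsi
      have h2 := hmem i' hiR' hsi'
      exact h1.1 (h2.2 i hiR (fun h => hii' h))


-- ===== VERDICT (by name: the statement is the Claim_ definition above) =====
theorem errCorrect_umi_spec : Claim_equal_errCorrect_umi := by
  intro x udict _ hpre
  unfold Spec_errCorrect_umi errCorrect_umi errCorrect_umi_alt
  simp only [PySem.List.dedup_eq_ofList]
  set xs := x.toList with hxs
  set Kl := PySem.Set.ofList (udict.map Prod.fst) with hK
  set L := Kl.foldl (fun s k => s.add k.toList.length) PySem.Set.empty with hL
  set Alph := Kl.foldl (fun s k => s.update k.toList) PySem.Set.empty with hAl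
  rw [pvAList xs Kl, pvBList xs Kl L Alph]
  have hKnd : Kl.Nodup := PySem.Set.nodup_ofList _
  have hAnd : Alph.Nodup := pvNodupAlph _ _ List.nodup_nil
  have hLeq : L = PySem.Set.ofList (Kl.map (fun k => k.toList.length)) := by
    rw [hL, ← PySem.Set.update_map_eq_foldl_add, PySem.Set.update_empty]
  have hLnd : L.Nodup := by rw [hLeq]; exact PySem.Set.nodup_ofList _
  have hLmem : ∀ m : Nat, m ∈ L ↔ ∃ k ∈ Kl, k.toList.length = m := by
    intro m
    rw [hLeq, PySem.Set.mem_ofList, List.mem_map]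
  have hAmem : ∀ c : Char, c ∈ Alph ↔ ∃ k ∈ Kl, c ∈ k.toList := by
    intro c
    rw [hAl, pvMemAlph]
    simp [PySem.Set.empty]
  have hpre' : ∀ k ∈ Kl, k.toList.length ≤ xs.length := by
    intro k hk
    rw [hK, PySem.Set.mem_ofList, List.mem_map] at hk
    obtain ⟨p, hp, rfl⟩ := hk
    exact hpre p hp
  have hMmem : ∀ s, s ∈ L.flatMap (pvG xs Kl Alph) ↔ s ∈ Kl ∧ pvHamm xs s.toList = 1 := by
    intro s
    rw [List.mem_flatMap]
    constructor
    · rintro ⟨m, hmL, hsG⟩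
      have hm : m ≤ xs.length := by
        obtain ⟨k, hk, rfl⟩ := (hLmem m).1 hmL
        exact hpre' k hk
      obtain ⟨i, hi, c, hc, hne, hKc, rfl⟩ := (pvMemG xs Kl Alph m s).1 hsG
      refine ⟨(PySem.Set.contains_iff Kl _).1 hKc, ?_⟩
      rw [pvHamm_one_iff]
      have hlen := pvCand_length xs m i c hm hi
      refine ⟨i, by omega, ?_, ?_⟩
      · rw [pvCand_get xs m i c hm hi i hi, if_pos rfl, pvGetD xs m i hm hi]
        intro hcontra
        exact hne (Option.some.inj hcontra).symm
      · intro j hj hji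
        rw [hlen] at hj
        rw [pvCand_get xs m i c hm hi j hj, if_neg hji]
    · rintro ⟨hsK, hH⟩
      rw [pvHamm_one_iff] at hH
      obtain ⟨i, hi, hne, hagree⟩ := hH
      have hm : s.toList.length ≤ xs.length := hpre' s hsK
      have hrec := pvRecon xs s i hm hi hne hagree
      refine ⟨s.toList.length, (hLmem _).2 ⟨s, hsK, rfl⟩, ?_⟩
      rw [pvMemG]
      refine ⟨i, hi, s.toList.getD i ' ', ?_, ?_, ?_, hrec⟩
      · rw [hAmem]
        refine ⟨s, hsK, ?_⟩
        rw [List.getD_eq_getElem?_getD, List.getElem?_eq_getElem hi]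
        exact List.getElem_mem hi
      · intro heq
        apply hne
        rw [pvGetD xs s.toList.length i hm hi, ← heq, List.getD_eq_getElem?_getD,
            List.getElem?_eq_getElem hi]
        simp
      · rw [← hrec]
        exact (PySem.Set.contains_iff Kl s).2 hsK
  have hlenL : ∀ m ∈ L, m ≤ xs.length := by
    intro m hmL
    obtain ⟨k, hk, rfl⟩ := (hLmem m).1 hmL
    exact hpre' k hk
  have hMnd : (L.flatMap (pvG xs Kl Alph)).Nodup := by
    rw [List.nodup_flatMap]
    refine ⟨fun m hmL => pvNodupG xs Kl Alph m (hlenL m hmL) hAnd, ?_⟩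
    refine List.Pairwise.imp_of_mem ?_ hLnd
    intro a b haL hbL hab s hsa hsb
    exact hab ((pvG_len xs Kl Alph a (hlenL a haL) s hsa) ▸
      (pvG_len xs Kl Alph b (hlenL b hbL) s hsb))
  have hKand : (Kl.filter (fun k => decide (pvHamm xs k.toList = 1))).Nodup :=
    List.Nodup.filter _ hKnd
  have hperm : (L.flatMap (pvG xs Kl Alph)).Perm (Kl.filter (fun k => decide (pvHamm xs k.toList = 1))) := by
    rw [List.perm_ext_iff_of_nodup hMnd hKand]
    intro s
    rw [hMmem, List.mem_filter]
    simp
  have hlen := hperm.length_eq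
  by_cases h1 : (Kl.filter (fun k => decide (pvHamm xs k.toList = 1))).length = 1
  · rw [if_pos h1, if_pos (by omega)]
    obtain ⟨a, ha⟩ := List.length_eq_one_iff.1 h1
    obtain ⟨b, hb⟩ := List.length_eq_one_iff.1 (by omega : (L.flatMap (pvG xs Kl Alph)).length = 1)
    have hba : b = a := by
      have hbm : b ∈ L.flatMap (pvG xs Kl Alph) := by rw [hb]; exact List.mem_singleton.2 rfl
      have := hperm.mem_iff.1 hbm
      rw [ha, List.mem_singleton] at this
      exact this
    rw [ha, hb, hba]
  · rw [if_neg h1, if_neg (by omega)]
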